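-- pv_equiv track=rewrite | github.com/ey242/KiVA | colab_helper_functions/helper_compo.py | extract_model_answer
-- ===== SOURCE A (Python) =====
-- def extract_model_answer(response_text, type):
--   if type == "numbers":
--     options = ["(1)", "(2)", "(3)", "(4)", "(5)"]
--   elif type == "letters":
--     options = ["(A)", "(B)", "(C)", "(D)"]
--
--   model_option = None
--   earliest_index = len(response_text)
--
--   for option in options:
--       idx = response_text.find(option)
--       if idx != -1 and idx < earliest_index:
--           earliest_index = idx
--           model_option = option
--
--   return model_option if model_option else "Null"
-- ===== SOURCE B (Python) =====
-- def extract_model_answer(response_text, type):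
--     if type == "numbers":
--         options = ["(1)", "(2)", "(3)", "(4)", "(5)"]
--     elif type == "letters":
--         options = ["(A)", "(B)", "(C)", "(D)"]
--
--     for i in range(len(response_text)):
--         for option in options:
--             if response_text.startswith(option, i):
--                 return option
--     return "Null"
-- ===== Notes on version B (the rewrite author's own statement) =====
-- stated objective: alternative
-- what changed: Instead of computing each option's first-occurrence index with str.find and keeping the minimum, B scans text positions left to right and returns the first option that matches at the current position (startswith), so the earliest marker is found directly.
import Mathlib
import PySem

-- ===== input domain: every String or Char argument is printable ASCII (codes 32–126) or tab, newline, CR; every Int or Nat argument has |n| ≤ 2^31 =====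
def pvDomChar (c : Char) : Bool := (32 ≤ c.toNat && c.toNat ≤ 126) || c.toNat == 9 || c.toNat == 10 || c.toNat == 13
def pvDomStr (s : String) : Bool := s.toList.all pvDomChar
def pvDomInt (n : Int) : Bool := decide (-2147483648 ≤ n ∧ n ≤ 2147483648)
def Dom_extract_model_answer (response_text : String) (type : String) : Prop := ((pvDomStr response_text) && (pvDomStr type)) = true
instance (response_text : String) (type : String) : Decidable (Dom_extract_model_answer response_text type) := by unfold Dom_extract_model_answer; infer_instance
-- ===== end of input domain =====

-- B finds the earliest-appearing option marker by scanning text positions left to right and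
-- testing each option with startswith, instead of A's per-option find + running minimum
-- (alternative decomposition, same asymptotic cost).


-- ===== PORT A =====
def extract_model_answer (response_text : String) (type : String) : String :=
  let options : List String :=
    if type = "numbers" then ["(1)", "(2)", "(3)", "(4)", "(5)"]
    else if type = "letters" then ["(A)", "(B)", "(C)", "(D)"]
    else []  -- Python raises NameError here ('options' unbound); excluded by Pre_
  let r := options.foldl
    (fun (st : Option String × Int) (option : String) =>
      let idx := PySem.Str.find response_text option
      if idx ≠ -1 ∧ idx < st.2 then (some option, idx) else st)
    (none, PySem.Str.len response_text)
  match r.1 with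
  | some o => o
  | none => "Null"

-- ===== PORT B =====
-- Source B's outer loop over text positions i, rendered as structural recursion over suffixes of
-- the text; 'response_text.startswith(option, i)' is startswith on the i-th suffix (exact for
-- 0 ≤ i < len).
def pvScan (options : List String) : List Char → Option String
  | [] => none
  | c :: rest =>
    match options.find? (fun option => PySem.Chars.startswith (c :: rest) option.toList) with
    | some option => some option
    | none => pvScan options rest

def extract_model_answer_alt (response_text : String) (type : String) : String :=
  let options : List String :=
    if type = "numbers" then ["(1)", "(2)", "(3)", "(4)", "(5)"]
    else if type = "letters" then ["(A)", "(B)", "(C)", "(D)"]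
    else []  -- Python raises NameError here; excluded by Pre_
  match pvScan options response_text.toList with
  | some o => o
  | none => "Null"

-- ===== PRECONDITION & SPEC =====
-- Pre_ excludes only the types other than "numbers"/"letters", on which the Python A raises
-- NameError ('options' is never assigned); both programs raise there.
def Pre_extract_model_answer (response_text : String) (type : String) : Prop :=
  type = "numbers" ∨ type = "letters"
instance (response_text : String) (type : String) : Decidable (Pre_extract_model_answer response_text type) := by unfold Pre_extract_model_answer; infer_instance

def pvWitness_extract_model_answer : String × String := ("I pick (2) over (1).", "numbers")

def Spec_extract_model_answer (response_text : String) (type : String) (out : String) : Prop := out = extract_model_answer_alt response_text type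
instance (response_text : String) (type : String) (out : String) : Decidable (Spec_extract_model_answer response_text type out) := by unfold Spec_extract_model_answer; infer_instance

-- ===== CLAIM (what is proved, stated in full; the proofs are below) =====
def Claim_equal_extract_model_answer : Prop := ∀ (response_text : String) (type : String), Dom_extract_model_answer response_text type → Pre_extract_model_answer response_text type → Spec_extract_model_answer response_text type (extract_model_answer response_text type)

-- ===== LEMMAS AND PROOFS =====

-- A's loop body, on the List Char side.
def pvStep (s : List Char) (st : Option String × Int) (o : String) : Option String × Int :=
  let idx := PySem.Chars.find s o.toList
  if idx ≠ -1 ∧ idx < st.2 then (some o, idx) else st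

-- find is characterised by "matches at n, and at no earlier position".
theorem pv_find_eq_of (s p : List Char) (n : Nat)
    (h1 : p <+: s.drop n) (h2 : ∀ i < n, ¬ p <+: s.drop i) :
    PySem.Chars.find s p = (n : Int) := by
  have hinf : p <:+: s := h1.isInfix.trans (List.drop_suffix n s).isInfix
  have hnn : 0 ≤ PySem.Chars.find s p := (PySem.Chars.find_nonneg_iff s p).mpr hinf
  obtain ⟨hm, hmin⟩ := PySem.Chars.find_spec hnn
  rcases lt_trichotomy (PySem.Chars.find s p).toNat n with h | h | h
  · exact absurd hm (h2 _ h)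
  · omega
  · exact absurd h1 (hmin n h)

theorem pv_find_eq_zero_of_prefix (s p : List Char) (h : p <+: s) :
    PySem.Chars.find s p = 0 := by
  have := pv_find_eq_of s p 0 (by simpa using h) (by omega)
  simpa using this

-- Shifting by one position when nothing matches at position 0.
theorem pv_find_cons (c : Char) (t p : List Char) (hpre : ¬ p <+: (c :: t)) :
    PySem.Chars.find (c :: t) p =
      (if PySem.Chars.find t p = -1 then -1 else PySem.Chars.find t p + 1) := by
  by_cases h : PySem.Chars.find t p = -1
  · have hnt : ¬ p <:+: t := (PySem.Chars.find_eq_neg_one_iff t p).mp h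
    have : ¬ p <:+: (c :: t) := by
      rw [List.infix_cons_iff]; rintro (h' | h') <;> [exact hpre h'; exact hnt h']
    simp [h, (PySem.Chars.find_eq_neg_one_iff _ p).mpr this]
  · have hnn : 0 ≤ PySem.Chars.find t p := by
      have := PySem.Chars.neg_one_le_find t p; omega
    obtain ⟨hm, hmin⟩ := PySem.Chars.find_spec hnn
    have heq : PySem.Chars.find (c :: t) p = (((PySem.Chars.find t p).toNat + 1 : Nat) : Int) := by
      apply pv_find_eq_of
      · simpa [List.drop_succ_cons] using hm
      · intro i hi
        match i with
        | 0 => simpa using hpre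
        | (j+1) =>
          rw [List.drop_succ_cons]
          exact hmin j (by omega)
    rw [heq]; simp [h]; omega

-- Once the running minimum is 0, the fold never changes state again.
theorem pv_fold_stuck (opts : List String) (s : List Char) (m : Option String) :
    List.foldl (pvStep s) (m, 0) opts = (m, 0) := by
  induction opts with
  | nil => rfl
  | cons a rest ih =>
    have hge := PySem.Chars.neg_one_le_find s a.toList
    simp only [List.foldl_cons, pvStep]
    rw [if_neg (by omega)]
    exact ih

-- On the empty text every option (all nonempty) has find = -1, so the fold keeps its state.
theorem pv_fold_nil (opts : List String) (hne : ∀ o ∈ opts, o.toList ≠ []) (st : Option String × Int) :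
    List.foldl (pvStep []) st opts = st := by
  induction opts generalizing st with
  | nil => rfl
  | cons a rest ih =>
    have hf : PySem.Chars.find [] a.toList = -1 := by
      rw [PySem.Chars.find_eq_neg_one_iff, List.infix_nil]
      exact hne a (by simp)
    simp only [List.foldl_cons, pvStep, hf]
    rw [if_neg (by omega)]
    exact ih (fun o ho => hne o (by simp [ho])) st

-- If o is the unique option with find = 0, the fold ends with model_option = o.
theorem pv_fold_pick (opts : List String) (s : List Char) (o : String) :
    o ∈ opts → PySem.Chars.find s o.toList = 0 →
    (∀ o' ∈ opts, PySem.Chars.find s o'.toList = 0 → o' = o) →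
    ∀ (m : Option String) (e : Int), 1 ≤ e →
      (List.foldl (pvStep s) (m, e) opts).1 = some o := by
  induction opts with
  | nil => intro h; simp at h
  | cons a rest ih =>
    intro hmem h0 huniq m e he
    by_cases ha : a = o
    · subst ha
      simp only [List.foldl_cons, pvStep, h0]
      rw [if_pos (by constructor <;> omega)]
      rw [pv_fold_stuck]
    · have homem : o ∈ rest := by
        rcases List.mem_cons.mp hmem with h | h
        · exact absurd h.symm ha
        · exact h
      have huniq' : ∀ o' ∈ rest, PySem.Chars.find s o'.toList = 0 → o' = o :=
        fun o' ho' => huniq o' (by simp [ho'])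
      simp only [List.foldl_cons, pvStep]
      by_cases hc : PySem.Chars.find s a.toList ≠ -1 ∧ PySem.Chars.find s a.toList < e
      · rw [if_pos hc]
        have hga := PySem.Chars.neg_one_le_find s a.toList
        have hne0 : PySem.Chars.find s a.toList ≠ 0 := fun h =>
          ha (huniq a (by simp) h)
        exact ih homem h0 huniq' (some a) _ (by omega)
      · rw [if_neg hc]
        exact ih homem h0 huniq' m e he

-- If nothing matches at position 0, the fold over c :: t is the fold over t with every index
-- (and the initial bound) shifted up by one; the selected option is unchanged.
theorem pv_fold_shift (opts : List String) (c : Char) (t : List Char)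
    (h : ∀ o ∈ opts, ¬ o.toList <+: (c :: t)) :
    ∀ (m : Option String) (e : Int),
      List.foldl (pvStep (c :: t)) (m, e + 1) opts =
        ((List.foldl (pvStep t) (m, e) opts).1, (List.foldl (pvStep t) (m, e) opts).2 + 1) := by
  induction opts with
  | nil => intro m e; rfl
  | cons a rest ih =>
    intro m e
    have hcons := pv_find_cons c t a.toList (h a (by simp))
    have h' : ∀ o ∈ rest, ¬ o.toList <+: (c :: t) := fun o ho => h o (by simp [ho])
    have hge := PySem.Chars.neg_one_le_find t a.toList
    simp only [List.foldl_cons, pvStep]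
    by_cases hfa : PySem.Chars.find t a.toList = -1
    · rw [hcons, if_pos hfa]
      rw [if_neg (by omega), if_neg (by omega)]
      exact ih h' m e
    · rw [hcons, if_neg hfa]
      by_cases hlt : PySem.Chars.find t a.toList < e
      · rw [if_pos (by constructor <;> omega), if_pos (by constructor <;> omega)]
        exact ih h' (some a) _
      · rw [if_neg (by omega), if_neg (by omega)]
        exact ih h' m e

-- Main invariant: A's fold selects exactly the option B's position scan returns.
theorem pv_main (opts : List String)
    (hne : ∀ o ∈ opts, o.toList ≠ [])
    (hanti : ∀ o1 ∈ opts, ∀ o2 ∈ opts, o1.toList <+: o2.toList → o1 = o2) :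
    ∀ s : List Char,
      (List.foldl (pvStep s) (none, (s.length : Int)) opts).1 = pvScan opts s := by
  intro s
  induction s with
  | nil => rw [pv_fold_nil opts hne]; rfl
  | cons c t ih =>
    cases hm : opts.find? (fun option => PySem.Chars.startswith (c :: t) option.toList) with
    | none =>
      have hnp : ∀ o ∈ opts, ¬ o.toList <+: (c :: t) := by
        intro o ho hpre
        have := List.find?_eq_none.mp hm o ho
        exact this ((PySem.Chars.startswith_iff _ _).mpr hpre)
      have hlen : ((c :: t).length : Int) = (t.length : Int) + 1 := by
        simp [List.length_cons]
      rw [pvScan, hm, hlen, pv_fold_shift opts c t hnp, ← ih]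
    | some o =>
      have homem : o ∈ opts := List.mem_of_find?_eq_some hm
      have hsw := List.find?_some hm
      have hpre : o.toList <+: (c :: t) := (PySem.Chars.startswith_iff _ _).mp (by simpa using hsw)
      have h0 : PySem.Chars.find (c :: t) o.toList = 0 := pv_find_eq_zero_of_prefix _ _ hpre
      have huniq : ∀ o' ∈ opts, PySem.Chars.find (c :: t) o'.toList = 0 → o' = o := by
        intro o' ho' h0'
        have hnn : 0 ≤ PySem.Chars.find (c :: t) o'.toList := by omega
        have hpre' : o'.toList <+: (c :: t) := by
          have := (PySem.Chars.find_spec hnn).1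
          rwa [h0'] at this
          
        rcases List.prefix_or_prefix_of_prefix hpre' hpre with h | h
        · exact hanti o' ho' o homem h
        · exact (hanti o homem o' ho' h).symm
      rw [pvScan, hm]
      exact pv_fold_pick opts (c :: t) o homem h0 huniq none _ (by simp)

-- A's fold body equals pvStep on the toList side.
theorem pv_fold_body (rt : String) :
    (fun (st : Option String × Int) (option : String) =>
      let idx := PySem.Str.find rt option
      if idx ≠ -1 ∧ idx < st.2 then (some option, idx) else st) = pvStep rt.toList := by
  funext st o
  simp [pvStep, PySem.Str.find_eq]

theorem pv_ports_agree (rt : String) (opts : List String)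
    (hne : ∀ o ∈ opts, o.toList ≠ [])
    (hanti : ∀ o1 ∈ opts, ∀ o2 ∈ opts, o1.toList <+: o2.toList → o1 = o2) :
    (match (List.foldl (pvStep rt.toList) (none, (rt.toList.length : Int)) opts).1 with
      | some o => o
      | none => "Null") =
    (match pvScan opts rt.toList with
      | some o => o
      | none => "Null") := by
  rw [pv_main opts hne hanti rt.toList]

-- ===== VERDICT (by name: the statement is the Claim_ definition above) =====
theorem extract_model_answer_spec : Claim_equal_extract_model_answer := by
  intro rt type _ hpre
  unfold Spec_extract_model_answer extract_model_answer extract_model_answer_alt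
  rcases hpre with h | h <;> subst h <;>
    simp only [reduceIte, pv_fold_body, PySem.Str.len_eq]
  · exact pv_ports_agree rt ["(1)", "(2)", "(3)", "(4)", "(5)"] (by decide) (by decide)
  · exact pv_ports_agree rt ["(A)", "(B)", "(C)", "(D)"] (by decide) (by decide)
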